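-- pv_equiv track=rewrite | github.com/pypi-data/pypi-mirror-402 | packages/manta-topic-modelling/manta_topic_modelling-0.9.1-py3-none-any.whl/manta/utils/visualization/topic_space_graph_output_old.py | _reorder_for_circular_contrast
-- ===== SOURCE A (Python) =====
-- from typing import Optional, Union, List, Tuple
--
-- def _reorder_for_circular_contrast(colors: List[tuple], n_topics: int) -> List[tuple]:
--     """
--     Reorder colors to maximize contrast between circular neighbors.
--
--     Args:
--         colors: List of RGBA color tuples
--         n_topics: Number of topics (for validation)
--
--     Returns:
--         Reordered list of colors optimized for circular arrangement
--     """
--     if n_topics <= 2: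
--         return colors
--
--     # For odd numbers, use alternating pattern starting from 0
--     # For even numbers, use alternating pattern with offset
--     reordered = [None] * n_topics
--     available_colors = list(colors)
--
--     # Strategy: Fill positions by jumping around the circle
--     # This ensures adjacent topics get maximally different colors
--
--     # Start with position 0
--     positions_to_fill = list(range(n_topics))
--
--     # Create optimal ordering by spacing out color assignments
--     step_size = max(2, n_topics // 3)  # Jump by at least 2, more for larger circles
--
--     filled_positions = []
--     color_idx = 0
--
--     # First pass: fill every step_size positions
--     for start_offset in range(step_size):
--         pos = start_offset
--         while pos < n_topics and color_idx < len(available_colors):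
--             if pos not in filled_positions:
--                 reordered[pos] = available_colors[color_idx]
--                 filled_positions.append(pos)
--                 color_idx += 1
--             pos += step_size
--
--     # Second pass: fill remaining positions
--     for pos in range(n_topics):
--         if pos not in filled_positions and color_idx < len(available_colors):
--             reordered[pos] = available_colors[color_idx]
--             color_idx += 1
--
--     # Ensure no None values (fallback)
--     for i, color in enumerate(reordered):
--         if color is None:
--             reordered[i] = available_colors[i % len(available_colors)]
--
--     return reordered
-- ===== SOURCE B (Python) =====
-- from typing import List
--
-- def _reorder_for_circular_contrast(colors: List[tuple], n_topics: int) -> List[tuple]: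
--     """O(n) re-implementation: each position's color index is computed by a
--     closed-form rank (prefix sums of the jump-cycle block sizes) instead of
--     scattering colors into a placeholder array with membership tracking."""
--     if n_topics <= 2:
--         return colors
--     n = n_topics
--     step = max(2, n // 3)
--     # starts[o] = how many positions are visited before residue class o
--     starts = [0]
--     for o in range(step - 1):
--         starts.append(starts[-1] + (n - o - 1) // step + 1)
--     m = len(colors)
--     out = []
--     for p in range(n):
--         k = starts[p % step] + p // step
--         out.append(colors[k] if k < m else colors[p % m])
--     return out
-- ===== Notes on version B (the rewrite author's own statement) =====
-- stated objective: faster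
-- what changed: Replaces A's placeholder-array scatter with its growing filled_positions membership list and dead second pass by a closed-form per-position color index: prefix sums of the jump-cycle block sizes give each position's rank directly, built in one O(n) pass.
import Mathlib
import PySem

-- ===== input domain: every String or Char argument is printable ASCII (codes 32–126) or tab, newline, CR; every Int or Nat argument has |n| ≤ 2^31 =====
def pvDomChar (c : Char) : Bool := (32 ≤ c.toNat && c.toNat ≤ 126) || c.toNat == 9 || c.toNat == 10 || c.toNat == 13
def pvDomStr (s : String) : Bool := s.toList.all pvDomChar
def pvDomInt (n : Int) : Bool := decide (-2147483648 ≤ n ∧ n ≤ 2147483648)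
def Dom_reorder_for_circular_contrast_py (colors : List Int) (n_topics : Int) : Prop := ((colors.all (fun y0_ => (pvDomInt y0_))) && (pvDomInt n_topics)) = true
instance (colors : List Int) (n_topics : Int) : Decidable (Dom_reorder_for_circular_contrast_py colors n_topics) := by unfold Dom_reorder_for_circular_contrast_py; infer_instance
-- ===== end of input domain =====

-- B replaces A's quadratic placeholder scatter (growing membership list, dead second pass)
-- by a closed-form per-position color rank from prefix sums; equal return values on Pre_.

-- ===== PORT A =====
-- inner `while pos < n and color_idx < len(colors)` loop of A's first pass (fuel = n bounds
-- the iteration count, since pos grows by step ≥ 2 each turn; the loop state is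
-- (reordered, filled_positions, color_idx))
def pvPassInnerA (colors : List Int) (nt step : Nat) :
    Nat → List (Option Int) → List Nat → Nat → Nat → List (Option Int) × List Nat × Nat
  | 0, r, filled, ci, _ => (r, filled, ci)
  | fuel + 1, r, filled, ci, pos =>
    if pos < nt ∧ ci < colors.length then
      if pos ∈ filled then pvPassInnerA colors nt step fuel r filled ci (pos + step)
      else pvPassInnerA colors nt step fuel (r.set pos (some (colors.getD ci 0)))
            (filled ++ [pos]) (ci + 1) (pos + step)
    else (r, filled, ci)

def reorder_for_circular_contrast_py (colors : List Int) (n_topics : Int) : List Int :=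
  if n_topics ≤ 2 then colors
  else
    let nt := n_topics.toNat
    let step := max 2 (nt / 3)
    -- first pass: for start_offset in range(step): while …
    let s1 := (List.range step).foldl
      (fun s o => pvPassInnerA colors nt step nt s.1 s.2.1 s.2.2 o)
      (List.replicate nt (none : Option Int), ([] : List Nat), 0)
    -- second pass: fill remaining positions (filled_positions is not updated here, as in A)
    let s2 := (List.range nt).foldl
      (fun (s : List (Option Int) × Nat) pos =>
        if pos ∉ s1.2.1 ∧ s.2 < colors.length then
          (s.1.set pos (some (colors.getD s.2 0)), s.2 + 1)
        else s)
      (s1.1, s1.2.2)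
    -- fallback: replace remaining None at index i by colors[i % len(colors)]
    s2.1.zipIdx.map (fun ic =>
      match ic.1 with
      | some v => v
      | none => colors.getD (ic.2 % colors.length) 0)

-- ===== PORT B =====
def reorder_for_circular_contrast_py_alt (colors : List Int) (n_topics : Int) : List Int :=
  if n_topics ≤ 2 then colors
  else
    let nt := n_topics.toNat
    let step := max 2 (nt / 3)
    let starts := (List.range (step - 1)).foldl
      (fun s o => s ++ [s.getLast! + (nt - o - 1) / step + 1]) [0]
    let m := colors.length
    (List.range nt).map (fun p =>
      let k := starts.getD (p % step) 0 + p / step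
      if k < m then colors.getD k 0 else colors.getD (p % m) 0)

-- ===== PRECONDITION & SPEC =====
-- Pre_ excludes only inputs where the Python A raises ZeroDivisionError
-- (colors empty with n_topics > 2: the fallback computes i % len(colors)).
def Pre_reorder_for_circular_contrast_py (colors : List Int) (n_topics : Int) : Prop :=
  n_topics ≤ 2 ∨ colors ≠ []
instance (colors : List Int) (n_topics : Int) : Decidable (Pre_reorder_for_circular_contrast_py colors n_topics) := by unfold Pre_reorder_for_circular_contrast_py; infer_instance
def pvWitness_reorder_for_circular_contrast_py : List Int × Int := ([1, 2, 3], 7)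

def Spec_reorder_for_circular_contrast_py (colors : List Int) (n_topics : Int) (out : List Int) : Prop := out = reorder_for_circular_contrast_py_alt colors n_topics
instance (colors : List Int) (n_topics : Int) (out : List Int) : Decidable (Spec_reorder_for_circular_contrast_py colors n_topics out) := by unfold Spec_reorder_for_circular_contrast_py; infer_instance

-- ===== CLAIM (what is proved, stated in full; the proofs are below) =====
def Claim_equal_reorder_for_circular_contrast_py : Prop := ∀ (colors : List Int) (n_topics : Int), Dom_reorder_for_circular_contrast_py colors n_topics → Pre_reorder_for_circular_contrast_py colors n_topics → Spec_reorder_for_circular_contrast_py colors n_topics (reorder_for_circular_contrast_py colors n_topics)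

-- ===== LEMMAS AND PROOFS =====

-- the positions visited by A's inner loop starting at `pos` (same fuel recursion)
def pvBlockL (nt step : Nat) : Nat → Nat → List Nat
  | 0, _ => []
  | fuel + 1, pos => if pos < nt then pos :: pvBlockL nt step fuel (pos + step) else []

-- one step of A's first-pass loop body, as a fold step over visited positions
def pvG (colors : List Int) (s : List (Option Int) × List Nat × Nat) (p : Nat) :
    List (Option Int) × List Nat × Nat :=
  if p ∈ s.2.1 ∨ ¬ s.2.2 < colors.length then s
  else (s.1.set p (some (colors.getD s.2.2 0)), s.2.1 ++ [p], s.2.2 + 1)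

-- scatter without the bookkeeping (used only to characterise the result array)
def pvScat (colors : List Int) : List (Option Int) → List Nat → Nat → List (Option Int)
  | r, [], _ => r
  | r, p :: ps, ci =>
    if ci < colors.length then pvScat colors (r.set p (some (colors.getD ci 0))) ps (ci + 1) else r

def pvCnt (nt step o : Nat) : Nat := (nt - o - 1) / step + 1

def pvBlk (nt step o : Nat) : List Nat := (List.range (pvCnt nt step o)).map (fun q => o + q * step)

def pvJmp (nt step : Nat) : List Nat := (List.range step).flatMap (pvBlk nt step)

def pvSS (nt step o : Nat) : Nat := ((List.range o).map (pvCnt nt step)).sum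

def pvRnk (nt step p : Nat) : Nat := pvSS nt step (p % step) + p / step

lemma pv_getLast!_concat (l : List Nat) (a : Nat) : (l ++ [a]).getLast! = a := by
  induction l with
  | nil => rfl
  | cons x xs ih => simpa [List.getLast!, List.getLast?_concat] using ih

lemma pvG_stuck (colors : List Int) (l : List Nat) (s : List (Option Int) × List Nat × Nat)
    (h : ¬ s.2.2 < colors.length) : List.foldl (pvG colors) s l = s := by
  induction l with
  | nil => rfl
  | cons p ps ih =>
    rw [List.foldl_cons]
    have h1 : pvG colors s p = s := by unfold pvG; rw [if_pos (Or.inr h)]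
    rw [h1]; exact ih

lemma pv_inner_eq_fold (colors : List Int) (nt step : Nat) :
    ∀ (fuel pos : Nat) (r : List (Option Int)) (filled : List Nat) (ci : Nat),
      pvPassInnerA colors nt step fuel r filled ci pos
        = List.foldl (pvG colors) (r, filled, ci) (pvBlockL nt step fuel pos) := by
  intro fuel
  induction fuel with
  | zero => intro pos r filled ci; rfl
  | succ fuel ih =>
    intro pos r filled ci
    by_cases hlt : pos < nt
    · by_cases hci : ci < colors.length
      · have hcond : pos < nt ∧ ci < colors.length := And.intro hlt hci
        simp only [pvPassInnerA, pvBlockL]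
        rw [if_pos hcond, if_pos hlt, List.foldl_cons]
        by_cases hmem : pos ∈ filled
        · rw [if_pos hmem, ih]
          congr 1
          unfold pvG; rw [if_pos (Or.inl hmem)]
        · rw [if_neg hmem, ih]
          congr 1
          unfold pvG
          rw [if_neg (by simp [hmem, hci])]
      · have hcond : ¬ (pos < nt ∧ ci < colors.length) := fun hh => hci hh.2
        simp only [pvPassInnerA, pvBlockL]
        rw [if_neg hcond, if_pos hlt, List.foldl_cons]
        have h1 : pvG colors (r, filled, ci) pos = (r, filled, ci) := by
          unfold pvG; rw [if_pos (Or.inr hci)]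
        rw [h1, pvG_stuck colors _ _ hci]
    · have hcond : ¬ (pos < nt ∧ ci < colors.length) := fun hh => hlt hh.1
      simp only [pvPassInnerA, pvBlockL]
      rw [if_neg hcond, if_neg hlt, List.foldl_nil]

lemma pv_fold_char (colors : List Int) :
    ∀ (js : List Nat) (r : List (Option Int)) (filled : List Nat) (ci : Nat),
      js.Nodup → (∀ p ∈ js, p ∉ filled) → ci ≤ colors.length →
      List.foldl (pvG colors) (r, filled, ci) js
        = (pvScat colors r js ci, filled ++ js.take (colors.length - ci),
           min (ci + js.length) colors.length) := by
  intro js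
  induction js with
  | nil =>
    intro r filled ci _ _ hci
    simp only [List.foldl_nil, pvScat, List.take_nil, List.append_nil, List.length_nil,
      Nat.add_zero]
    rw [Nat.min_eq_left hci]
  | cons p ps ih =>
    intro r filled ci hnd hdisj hci
    by_cases hcm : ci < colors.length
    · have hpf : p ∉ filled := hdisj p (by simp)
      have hstep : pvG colors (r, filled, ci) p
          = (r.set p (some (colors.getD ci 0)), filled ++ [p], ci + 1) := by
        simp [pvG, hpf, hcm]
      rw [List.foldl_cons, hstep, ih _ _ _ (hnd.of_cons)
        (by
          intro q hq
          simp only [List.mem_append, List.mem_singleton]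
          rintro (h | rfl)
          · exact hdisj q (by simp [hq]) h
          · exact (List.nodup_cons.mp hnd).1 hq)
        (by omega)]
      have htake : filled ++ [p] ++ ps.take (colors.length - (ci + 1))
          = filled ++ (p :: ps).take (colors.length - ci) := by
        have : colors.length - ci = (colors.length - (ci + 1)) + 1 := by omega
        rw [this, List.take_succ_cons, List.append_assoc]; rfl
      have hscat : pvScat colors r (p :: ps) ci
          = pvScat colors (r.set p (some (colors.getD ci 0))) ps (ci + 1) := by
        simp [pvScat, hcm]
      rw [← hscat, htake]
      have : ci + 1 + ps.length = ci + (p :: ps).length := by simp; omega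
      rw [this]
    · have hcieq : ci = colors.length := by omega
      have hstep : pvG colors (r, filled, ci) p = (r, filled, ci) := by simp [pvG, hcm]
      rw [List.foldl_cons, hstep, pvG_stuck colors _ _ (by simpa using hcm)]
      have hscat : pvScat colors r (p :: ps) ci = r := by simp [pvScat, hcm]
      rw [hscat]
      have h0 : colors.length - ci = 0 := by omega
      rw [h0, List.take_zero, List.append_nil, Nat.min_eq_right (by omega), hcieq]
  
lemma pvScat_length (colors : List Int) :
    ∀ (js : List Nat) (r : List (Option Int)) (ci : Nat),
      (pvScat colors r js ci).length = r.length := by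
  intro js
  induction js with
  | nil => intro r ci; rfl
  | cons p ps ih =>
    intro r ci
    by_cases hcm : ci < colors.length
    · simp [pvScat, hcm, ih]
    · simp [pvScat, hcm]

lemma pvScat_getElem?_miss (colors : List Int) :
    ∀ (js : List Nat) (r : List (Option Int)) (ci p : Nat),
      (∀ (j : Nat) (h : j < js.length), ci + j < colors.length → js[j] ≠ p) →
      (pvScat colors r js ci)[p]? = r[p]? := by
  intro js
  induction js with
  | nil => intro r ci p _; rfl
  | cons q ps ih =>
    intro r ci p hmiss
    by_cases hcm : ci < colors.length
    · have hq : q ≠ p := hmiss 0 (by simp) (by omega)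
      simp only [pvScat, if_pos hcm]
      rw [ih _ (ci + 1) p (by
        intro j hj hcij
        have := hmiss (j + 1) (by simpa using Nat.succ_lt_succ hj) (by omega)
        simpa using this)]
      exact List.getElem?_set_ne hq
    · simp [pvScat, hcm]

lemma pvScat_getElem?_hit (colors : List Int) :
    ∀ (js : List Nat) (r : List (Option Int)) (ci j p : Nat) (hj : j < js.length),
      js.Nodup → ci + j < colors.length → js[j] = p → p < r.length →
      (pvScat colors r js ci)[p]? = some (some (colors.getD (ci + j) 0)) := by
  intro js
  induction js with
  | nil => intro r ci j p hj; simp at hj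
  | cons q ps ih =>
    intro r ci j p hj hnd hcij hjs hp
    have hcm : ci < colors.length := by omega
    simp only [pvScat, if_pos hcm]
    cases j with
    | zero =>
      have hqp : q = p := by simpa using hjs
      subst hqp
      have hnotin : q ∉ ps := (List.nodup_cons.mp hnd).1
      rw [pvScat_getElem?_miss colors ps _ (ci + 1) q (by
        intro j' hj' _ heq
        exact hnotin (heq ▸ List.getElem_mem hj'))]
      simpa using List.getElem?_set_self (by simpa using hp)
    | succ j' =>
      have : ci + (j' + 1) = (ci + 1) + j' := by omega
      rw [this]
      exact ih _ (ci + 1) j' p (by simpa using Nat.lt_of_succ_lt_succ hj)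
        (hnd.of_cons) (by omega) (by simpa using hjs) (by simpa using hp)

lemma pv_foldl_fixed {α β : Type} (f : β → α → β) (s : β) (l : List α)
    (h : ∀ a ∈ l, f s a = s) : List.foldl f s l = s := by
  induction l with
  | nil => rfl
  | cons a as ih =>
    rw [List.foldl_cons, h a (by simp)]
    exact ih (fun a ha => h a (by simp [ha]))

lemma pvBlockL_eq_blk (nt step : Nat) (hstep : 1 ≤ step) :
    ∀ (fuel pos : Nat), nt - pos ≤ fuel * step →
      pvBlockL nt step fuel pos
        = if pos < nt then pvBlk nt step pos else [] := by
  intro fuel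
  induction fuel with
  | zero =>
    intro pos h
    have : ¬ pos < nt := by omega
    simp [pvBlockL, this]
  | succ fuel ih =>
    intro pos h
    by_cases hlt : pos < nt
    · rw [pvBlockL, if_pos hlt, if_pos hlt, ih (pos + step) (by
        have hmul : (fuel + 1) * step = fuel * step + step := by ring
        omega)]
      by_cases hlt2 : pos + step < nt
      · rw [if_pos hlt2]
        have hdiv : (nt - pos - 1) / step = (nt - pos - 1 - step) / step + 1 :=
          Nat.div_eq_sub_div (by omega) (by omega)
        have harg : nt - (pos + step) - 1 = nt - pos - 1 - step := by omega
        unfold pvBlk pvCnt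
        rw [harg]
        conv_rhs => rw [hdiv, List.range_succ_eq_map, List.map_cons, List.map_map]
        congr 1
        · simp
        · apply List.map_congr_left
          intro q _
          simp only [Function.comp, Nat.succ_eq_add_one]
          ring
      · rw [if_neg hlt2]
        unfold pvBlk pvCnt
        have : (nt - pos - 1) / step = 0 := Nat.div_eq_of_lt (by omega)
        rw [this]
        simp
    · simp [pvBlockL, hlt]
  
lemma pvBlk_mem (nt step o x : Nat) (hstep : 1 ≤ step) (ho : o < step) (hx : x ∈ pvBlk nt step o)
    (hont : o < nt) : x < nt ∧ x % step = o := by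
  unfold pvBlk at hx
  rcases List.mem_map.mp hx with ⟨q, hq, rfl⟩
  rcases List.mem_range.mp hq with hqlt
  have hqle : q ≤ (nt - o - 1) / step := by unfold pvCnt at hqlt; omega
  have : q * step ≤ nt - o - 1 := (Nat.le_div_iff_mul_le (by omega)).mp hqle
  constructor
  · omega
  · rw [Nat.add_mul_mod_self_right]
    exact Nat.mod_eq_of_lt ho

lemma pvBlk_nodup (nt step o : Nat) (hstep : 1 ≤ step) : (pvBlk nt step o).Nodup := by
  unfold pvBlk
  refine List.Nodup.map ?_ (List.nodup_range)
  intro a b hab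
  have hab' : o + a * step = o + b * step := hab
  exact Nat.eq_of_mul_eq_mul_right (by omega) (Nat.add_left_cancel hab')

lemma pvJmp_nodup_aux (nt step : Nat) (hstep : 1 ≤ step) (hnt : step ≤ nt) :
    ∀ (os : List Nat), os.Nodup → (∀ o ∈ os, o < step) → (os.flatMap (pvBlk nt step)).Nodup := by
  intro os
  induction os with
  | nil => intro _ _; simp
  | cons o os' ih =>
    intro hnd hlt
    rw [List.flatMap_cons]
    refine List.Nodup.append (pvBlk_nodup nt step o hstep) (ih hnd.of_cons (fun o' ho' => hlt o' (by simp [ho']))) ?_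
    intro x hx hx'
    rcases List.mem_flatMap.mp hx' with ⟨o', ho', hxo'⟩
    have h1 := pvBlk_mem nt step o x hstep (hlt o (by simp)) hx (by have := hlt o (by simp); omega)
    have h2 := pvBlk_mem nt step o' x hstep (hlt o' (by simp [ho'])) hxo'
      (by have := hlt o' (by simp [ho']); omega)
    have : o = o' := by omega
    exact (List.nodup_cons.mp hnd).1 (this ▸ ho')

lemma pvJmp_nodup (nt step : Nat) (hstep : 1 ≤ step) (hnt : step ≤ nt) : (pvJmp nt step).Nodup :=
  pvJmp_nodup_aux nt step hstep hnt (List.range step) List.nodup_range (fun o ho => List.mem_range.mp ho)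

lemma pvJmp_mem_lt (nt step x : Nat) (hstep : 1 ≤ step) (hnt : step ≤ nt) (hx : x ∈ pvJmp nt step) :
    x < nt := by
  rcases List.mem_flatMap.mp hx with ⟨o, ho, hxo⟩
  have holt := List.mem_range.mp ho
  exact (pvBlk_mem nt step o x hstep holt hxo (by omega)).1

lemma pv_q_lt_cnt (nt step p : Nat) (hstep : 1 ≤ step) (hp : p < nt) :
    p / step < pvCnt nt step (p % step) := by
  unfold pvCnt
  have h1 : p % step + p / step * step = p := Nat.mod_add_div' p step
  have : p / step ≤ (nt - p % step - 1) / step := by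
    rw [Nat.le_div_iff_mul_le (by omega)]
    omega
  omega

lemma pvJmp_mem_of_lt (nt step p : Nat) (hstep : 1 ≤ step) (hp : p < nt) : p ∈ pvJmp nt step := by
  apply List.mem_flatMap.mpr
  refine ⟨p % step, List.mem_range.mpr (Nat.mod_lt p (by omega)), ?_⟩
  unfold pvBlk
  apply List.mem_map.mpr
  exact ⟨p / step, List.mem_range.mpr (pv_q_lt_cnt nt step p hstep hp),
    by rw [Nat.mod_add_div']⟩

lemma pvJmp_perm (nt step : Nat) (hstep : 1 ≤ step) (hnt : step ≤ nt) :
    (pvJmp nt step).Perm (List.range nt) := by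
  apply List.Subperm.antisymm
  · exact (pvJmp_nodup nt step hstep hnt).subperm
      (fun x hx => List.mem_range.mpr (pvJmp_mem_lt nt step x hstep hnt hx))
  · exact (List.nodup_range).subperm
      (fun x hx => pvJmp_mem_of_lt nt step x hstep (List.mem_range.mp hx))

lemma pvJmp_length (nt step : Nat) (hstep : 1 ≤ step) (hnt : step ≤ nt) :
    (pvJmp nt step).length = nt := by
  rw [(pvJmp_perm nt step hstep hnt).length_eq, List.length_range]

lemma pvJmp_getElem_rnk (nt step p : Nat) (hstep : 1 ≤ step) (hnt : step ≤ nt) (hp : p < nt) :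
    ∃ h : pvRnk nt step p < (pvJmp nt step).length, (pvJmp nt step)[pvRnk nt step p]'h = p := by
  have homod : p % step < step := Nat.mod_lt p (by omega)
  have hsplit : List.range step
      = List.range (p % step) ++ List.map (fun x => p % step + x) (List.range (step - p % step)) := by
    rw [← List.range_add]
    congr 1
    omega
  have hjmp : pvJmp nt step
      = (List.range (p % step)).flatMap (pvBlk nt step)
        ++ (List.map (fun x => p % step + x) (List.range (step - p % step))).flatMap (pvBlk nt step) := by
    rw [pvJmp, hsplit, List.flatMap_append]
  have hlen1 : ((List.range (p % step)).flatMap (pvBlk nt step)).length = pvSS nt step (p % step) := by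
    rw [List.length_flatMap, pvSS]
    congr 1
    apply List.map_congr_left
    intro o _
    simp [pvBlk]
  have hpos : step - p % step = (step - p % step - 1) + 1 := by omega
  have hsecond : (List.map (fun x => p % step + x) (List.range (step - p % step))).flatMap (pvBlk nt step)
      = pvBlk nt step (p % step)
        ++ (List.map (fun x => p % step + x) (List.map Nat.succ (List.range (step - p % step - 1)))).flatMap (pvBlk nt step) := by
    rw [hpos, List.range_succ_eq_map]
    simp [List.flatMap_cons]
  have hq : p / step < (pvBlk nt step (p % step)).length := by
    simpa [pvBlk] using pv_q_lt_cnt nt step p hstep hp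
  have hblkval : (pvBlk nt step (p % step))[p / step]'hq = p := by
    simp [pvBlk, Nat.mod_add_div']
  have hrnklt : pvRnk nt step p < (pvJmp nt step).length := by
    rw [hjmp, List.length_append, hlen1, hsecond, List.length_append, pvRnk]
    omega
  refine ⟨hrnklt, ?_⟩
  have hge : ((List.range (p % step)).flatMap (pvBlk nt step)).length ≤ pvRnk nt step p := by
    rw [hlen1]
    unfold pvRnk
    exact Nat.le_add_right _ _
  have hidx : pvRnk nt step p - ((List.range (p % step)).flatMap (pvBlk nt step)).length
      = p / step := by
    rw [hlen1]
    unfold pvRnk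
    exact Nat.add_sub_cancel_left _ _
  have hq' : p / step < pvCnt nt step (p % step) := pv_q_lt_cnt nt step p hstep hp
  have hsome : (pvJmp nt step)[pvRnk nt step p]? = some p := by
    rw [hjmp, List.getElem?_append_right hge, hidx, hsecond, List.getElem?_append_left hq]
    unfold pvBlk
    rw [List.getElem?_map, List.getElem?_range hq']
    simp [Nat.mod_add_div']
  have := (List.getElem?_eq_getElem hrnklt).symm.trans hsome
  exact Option.some.inj this

lemma pvStarts_eq (nt step : Nat) :
    ∀ (k : Nat), (List.range k).foldl (fun s o => s ++ [s.getLast! + (nt - o - 1) / step + 1]) [0]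
      = (List.range (k + 1)).map (pvSS nt step) := by
  intro k
  induction k with
  | zero => simp [pvSS]
  | succ k ih =>
    rw [List.range_succ, List.foldl_append, ih, List.foldl_cons, List.foldl_nil]
    have hlast : ((List.range (k + 1)).map (pvSS nt step)).getLast! = pvSS nt step k := by
      rw [List.range_succ, List.map_append]
      exact pv_getLast!_concat _ _
    rw [hlast]
    have hss : pvSS nt step k + ((nt - k - 1) / step + 1) = pvSS nt step (k + 1) := by
      unfold pvSS
      rw [List.range_succ, List.map_append, List.sum_append]
      simp [pvCnt]
    rw [List.range_succ (n := k + 1), List.map_append]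
    congr 1
    simp
    omega

-- the main equality, for n_topics > 2
lemma pv_main (colors : List Int) (n_topics : Int) (hgt : ¬ n_topics ≤ 2) :
    reorder_for_circular_contrast_py colors n_topics
      = reorder_for_circular_contrast_py_alt colors n_topics := by
  have hnt3 : 3 ≤ n_topics.toNat := by omega
  unfold reorder_for_circular_contrast_py reorder_for_circular_contrast_py_alt
  rw [if_neg hgt, if_neg hgt]
  simp only []
  generalize hntg : n_topics.toNat = nt
  rw [hntg] at hnt3
  set step := max 2 (nt / 3) with hstepdef
  set m := colors.length with hmdef
  have hstep2 : 2 ≤ step := hstepdef ▸ le_max_left 2 (nt / 3)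
  have hstepnt : step ≤ nt := by
    rw [hstepdef]
    exact max_le (by omega) (Nat.div_le_self _ _)
  -- first pass equals the fold of pvG over the full jump order
  have hfold1 : (List.range step).foldl
        (fun s o => pvPassInnerA colors nt step nt s.1 s.2.1 s.2.2 o)
        (List.replicate nt (none : Option Int), ([] : List Nat), 0)
      = List.foldl (pvG colors)
        (List.replicate nt (none : Option Int), ([] : List Nat), 0) (pvJmp nt step) := by
    rw [pvJmp, List.foldl_flatMap]
    refine List.foldl_ext _ _ _ ?_
    intro s o ho
    calc pvPassInnerA colors nt step nt s.1 s.2.1 s.2.2 o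
        = List.foldl (pvG colors) (s.1, s.2.1, s.2.2) (pvBlockL nt step nt o) :=
          pv_inner_eq_fold colors nt step nt o s.1 s.2.1 s.2.2
      _ = List.foldl (pvG colors) s (pvBlk nt step o) := by
          rw [pvBlockL_eq_blk nt step (by omega) nt o
            (by
              have : nt ≤ nt * step := Nat.le_mul_of_pos_right nt (by omega)
              omega),
            if_pos (lt_of_lt_of_le (List.mem_range.mp ho) hstepnt)]
  have hchar := pv_fold_char colors (pvJmp nt step) (List.replicate nt (none : Option Int)) [] 0
    (pvJmp_nodup nt step (by omega) hstepnt) (by intro p _; simp) (Nat.zero_le _)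
  rw [pvJmp_length nt step (by omega) hstepnt] at hchar
  simp only [Nat.sub_zero, Nat.zero_add, List.nil_append] at hchar
  rw [hfold1, hchar]
  simp only []
  -- second pass is a no-op
  have hfix : (List.range nt).foldl
      (fun (s : List (Option Int) × Nat) pos =>
        if pos ∉ (pvJmp nt step).take m ∧ s.2 < m then
          (s.1.set pos (some (colors.getD s.2 0)), s.2 + 1)
        else s)
      (pvScat colors (List.replicate nt (none : Option Int)) (pvJmp nt step) 0, min nt m)
      = (pvScat colors (List.replicate nt (none : Option Int)) (pvJmp nt step) 0, min nt m) := by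
    apply pv_foldl_fixed
    intro pos hpos
    rw [if_neg]
    rintro ⟨h1, h2⟩
    have hntm : nt < m := by omega
    have htk : (pvJmp nt step).take m = pvJmp nt step :=
      List.take_of_length_le (by rw [pvJmp_length nt step (by omega) hstepnt]; omega)
    rw [htk] at h1
    exact h1 (pvJmp_mem_of_lt nt step pos (by omega) (List.mem_range.mp hpos))
  rw [hfix]
  simp only []
  -- starts = prefix sums
  have hs1 : step - 1 + 1 = step := by omega
  have hstarts : (List.range (step - 1)).foldl
      (fun s o => s ++ [s.getLast! + (nt - o - 1) / step + 1]) [0]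
      = (List.range step).map (pvSS nt step) := by
    rw [pvStarts_eq nt step (step - 1), hs1]
  rw [hstarts]
  -- elementwise comparison
  apply List.ext_getElem
  · simp [pvScat_length]
  · intro p hp1 hp2
    have hp : p < nt := by
      simpa [pvScat_length] using hp1
    simp only [List.getElem_map, List.getElem_zipIdx, List.getElem_range, Nat.zero_add]
    have hpm : p % step < step := Nat.mod_lt _ (by omega)
    have hgetd : ((List.range step).map (pvSS nt step)).getD (p % step) 0
        = pvSS nt step (p % step) := by
      rw [List.getD_eq_getElem?_getD, List.getElem?_map, List.getElem?_range hpm]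
      rfl
    rw [hgetd]
    obtain ⟨hjl, hjv⟩ := pvJmp_getElem_rnk nt step p (by omega) hstepnt hp
    have hrnkval : pvSS nt step (p % step) + p / step = pvRnk nt step p := rfl
    rw [hrnkval]
    by_cases hk : pvRnk nt step p < m
    · have hhit := pvScat_getElem?_hit colors (pvJmp nt step)
        (List.replicate nt (none : Option Int)) 0 (pvRnk nt step p) p hjl
        (pvJmp_nodup nt step (by omega) hstepnt) (by simpa using hk) hjv
        (by simp [hp])
      have hlt' : p < (pvScat colors (List.replicate nt (none : Option Int)) (pvJmp nt step) 0).length := by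
        rw [pvScat_length]; simpa using hp
      have hpg : (pvScat colors (List.replicate nt (none : Option Int)) (pvJmp nt step) 0)[p]'hlt'
          = some (colors.getD (pvRnk nt step p) 0) := by
        have h2 := List.getElem?_eq_getElem hlt'
        rw [hhit] at h2
        simpa using h2.symm
      rw [hpg, if_pos hk]
    · have hmiss := pvScat_getElem?_miss colors (pvJmp nt step)
        (List.replicate nt (none : Option Int)) 0 p
        (by
          intro j hj hjm hjp
          have hrnklt' : pvRnk nt step p < (pvJmp nt step).length := hjl
          have : j = pvRnk nt step p :=
            ((pvJmp_nodup nt step (by omega) hstepnt).getElem_inj_iff).mp (hjp.trans hjv.symm)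
          omega)
      have hlt' : p < (pvScat colors (List.replicate nt (none : Option Int)) (pvJmp nt step) 0).length := by
        rw [pvScat_length]; simpa using hp
      have hpg : (pvScat colors (List.replicate nt (none : Option Int)) (pvJmp nt step) 0)[p]'hlt'
          = none := by
        have h2 := List.getElem?_eq_getElem hlt'
        rw [hmiss] at h2
        rw [List.getElem?_replicate, if_pos hp] at h2
        simpa using h2.symm
      rw [hpg, if_neg hk]

-- ===== VERDICT (by name: the statement is the Claim_ definition above) =====
theorem reorder_for_circular_contrast_py_spec : Claim_equal_reorder_for_circular_contrast_py := by
  intro colors n_topics _ _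
  unfold Spec_reorder_for_circular_contrast_py
  by_cases h : n_topics ≤ 2
  · simp [reorder_for_circular_contrast_py, reorder_for_circular_contrast_py_alt, h]
  · exact pv_main colors n_topics h
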